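-- pv_equiv track=rewrite | github.com/seansampayo88/biteright-site | scripts/generate-pages-py.py | is_topic_plural
-- ===== SOURCE A (Python) =====
-- def is_topic_plural(topic_key):
--     k = topic_key.lower()
--     plural_endings = [
--         "noodles", "waffles", "pancakes", "croissants", "breadcrumbs", "wrappers",
--         "browns", "nuggets", "meatballs", "sausages", "chips", "eggs", "oats",
--     ]
--     if any(k == e or k.endswith("-" + e) for e in plural_endings):
--         return True
--     plural_exact = {
--         "fish-and-chips", "bacon-and-eggs", "scrambled-eggs", "overnight-oats",
--         "hash-browns", "chicken-nuggets", "spring-roll-wrappers", "dumpling-wrappers",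
--         "panko-breadcrumbs", "tortilla-chips", "flour-tortillas", "corn-tortillas",
--         "egg-rolls", "bagels", "pretzels",
--     }
--     return topic_key in plural_exact
-- ===== SOURCE B (Python) =====
-- PLURAL_ENDINGS = {
--     "noodles", "waffles", "pancakes", "croissants", "breadcrumbs", "wrappers",
--     "browns", "nuggets", "meatballs", "sausages", "chips", "eggs", "oats",
-- }
--
-- PLURAL_EXACT = {
--     "fish-and-chips", "bacon-and-eggs", "scrambled-eggs", "overnight-oats",
--     "hash-browns", "chicken-nuggets", "spring-roll-wrappers", "dumpling-wrappers",
--     "panko-breadcrumbs", "tortilla-chips", "flour-tortillas", "corn-tortillas",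
--     "egg-rolls", "bagels", "pretzels",
-- }
--
--
-- def is_topic_plural(topic_key):
--     suffix = topic_key.lower().rsplit("-", 1)[-1]
--     return suffix in PLURAL_ENDINGS or topic_key in PLURAL_EXACT
-- ===== Notes on version B (the rewrite author's own statement) =====
-- stated objective: simpler
-- what changed: Replaces the scan over 13 endings testing equality-or-dash-suffix per ending with a single extraction of the token after the last dash followed by one set membership test.
import Mathlib
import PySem

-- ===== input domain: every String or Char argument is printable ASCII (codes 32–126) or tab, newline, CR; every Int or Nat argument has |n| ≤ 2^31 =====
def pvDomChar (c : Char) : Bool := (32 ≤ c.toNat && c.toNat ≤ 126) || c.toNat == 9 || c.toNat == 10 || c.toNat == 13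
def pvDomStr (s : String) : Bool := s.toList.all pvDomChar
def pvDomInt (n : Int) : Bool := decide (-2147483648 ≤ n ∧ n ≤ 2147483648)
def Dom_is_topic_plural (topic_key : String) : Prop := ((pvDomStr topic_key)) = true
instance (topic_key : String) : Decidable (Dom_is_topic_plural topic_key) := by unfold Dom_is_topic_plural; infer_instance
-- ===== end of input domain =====

-- B replaces A's scan over the 13 endings (equality-or-"-"-suffix per ending) by extracting
-- the token after the last '-' once and doing a single set membership test (objective: simpler).

-- shared module-level data (the same literals both Pythons carry)
def pvEndings : List String :=
  ["noodles", "waffles", "pancakes", "croissants", "breadcrumbs", "wrappers",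
   "browns", "nuggets", "meatballs", "sausages", "chips", "eggs", "oats"]

def pvExactList : List String :=
  ["fish-and-chips", "bacon-and-eggs", "scrambled-eggs", "overnight-oats",
   "hash-browns", "chicken-nuggets", "spring-roll-wrappers", "dumpling-wrappers",
   "panko-breadcrumbs", "tortilla-chips", "flour-tortillas", "corn-tortillas",
   "egg-rolls", "bagels", "pretzels"]

-- ===== PORT A =====
def is_topic_plural (topic_key : String) : Bool :=
  let k := PySem.Str.lower topic_key
  if pvEndings.any (fun e => k == e || PySem.Str.endswith k ("-" ++ e)) then
    true
  else
    PySem.Set.contains (PySem.Set.ofList pvExactList) topic_key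

-- ===== PORT B =====
-- hand port of k.rsplit("-", 1)[-1] on List Char: the part after the last '-' (whole string if
-- there is no '-'); exact on all inputs.
def pvLastSeg (cs : List Char) : List Char :=
  (cs.reverse.takeWhile (fun c => c != '-')).reverse

-- Source B's PLURAL_ENDINGS set (strings modelled as List Char on the B side)
def pvEndingsSet : PySem.Set (List Char) := PySem.Set.ofList (pvEndings.map String.toList)

def is_topic_plural_alt (topic_key : String) : Bool :=
  let suffix := pvLastSeg (PySem.Str.lower topic_key).toList
  PySem.Set.contains pvEndingsSet suffix
    || PySem.Set.contains (PySem.Set.ofList pvExactList) topic_key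

-- ===== PRECONDITION & SPEC =====
def Spec_is_topic_plural (topic_key : String) (out : Bool) : Prop := out = is_topic_plural_alt topic_key
instance (topic_key : String) (out : Bool) : Decidable (Spec_is_topic_plural topic_key out) := by unfold Spec_is_topic_plural; infer_instance

-- ===== CLAIM (what is proved, stated in full; the proofs are below) =====
def Claim_equal_is_topic_plural : Prop := ∀ (topic_key : String), Dom_is_topic_plural topic_key → Spec_is_topic_plural topic_key (is_topic_plural topic_key)

-- ===== LEMMAS AND PROOFS =====

-- takeWhile (≠ '-') of r equals f (f dash-free) iff r is f or r starts with f ++ ['-']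
lemma pv_takeWhile_eq_iff (f r : List Char) (hf : ∀ c ∈ f, (c != '-') = true) :
    r.takeWhile (fun c => c != '-') = f ↔ (r = f ∨ f ++ ['-'] <+: r) := by
  induction f generalizing r with
  | nil =>
      cases r with
      | nil => simp
      | cons c t =>
          by_cases hc : c = '-'
          · subst hc; simp [List.cons_prefix_cons]
          · simp [hc, List.cons_prefix_cons, Ne.symm hc]
  | cons a f' ih =>
      have ha : (a != '-') = true := hf a (by simp)
      cases r with
      | nil => simp
      | cons c t =>
          have ha' : a ≠ '-' := by simpa using ha
          by_cases hc : c = '-'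
          · subst hc
            simp [List.cons_prefix_cons, ha', Ne.symm ha']
          · have hcb : (c != '-') = true := by simpa using hc
            rw [List.takeWhile_cons, if_pos hcb]
            simp only [List.cons_prefix_cons, List.cons_append]
            constructor
            · intro h
              injection h with h1 h2
              subst h1
              rcases (ih t (fun x hx => hf x (by simp [hx]))).mp h2 with h | h
              · exact Or.inl (by rw [h])
              · exact Or.inr ⟨rfl, h⟩
            · rintro (h | ⟨h1, h2⟩)
              · injection h with h1 h2
                subst h1
                rw [(ih t (fun x hx => hf x (by simp [hx]))).mpr (Or.inl h2)]
              · subst h1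
                rw [(ih t (fun x hx => hf x (by simp [hx]))).mpr (Or.inr h2)]

-- the characterization of the last segment: it equals a dash-free e iff the string IS e
-- or ends with "-" ++ e
lemma pv_lastSeg_eq_iff (cs e : List Char) (he : '-' ∉ e) :
    pvLastSeg cs = e ↔ (cs = e ∨ ('-' :: e) <:+ cs) := by
  unfold pvLastSeg
  have hf : ∀ c ∈ e.reverse, (c != '-') = true := by
    intro c hc
    rw [List.mem_reverse] at hc
    rw [bne_iff_ne]
    intro h
    rw [h] at hc
    exact he hc
  rw [show (cs.reverse.takeWhile (fun c => c != '-')).reverse = e ↔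
        cs.reverse.takeWhile (fun c => c != '-') = e.reverse from by
      constructor
      · intro h; rw [← h, List.reverse_reverse]
      · intro h; rw [h, List.reverse_reverse]]
  rw [pv_takeWhile_eq_iff _ _ hf]
  constructor
  · rintro (h | h)
    · left; rw [← List.reverse_reverse cs, h, List.reverse_reverse]
    · right
      rw [← List.reverse_prefix]
      simpa using h
  · rintro (h | h)
    · left; rw [h]
    · right
      rw [← List.reverse_prefix] at h
      simpa using h

-- none of the 13 endings contains a dash
lemma pv_endings_dashfree : ∀ e ∈ pvEndings, '-' ∉ e.toList := by decide

-- A's any-scan equals B's single set lookup, for every string k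
lemma pv_any_eq_contains (k : String) :
    pvEndings.any (fun e => k == e || PySem.Str.endswith k ("-" ++ e))
      = PySem.Set.contains pvEndingsSet (pvLastSeg k.toList) := by
  rw [Bool.eq_iff_iff]
  rw [List.any_eq_true]
  rw [PySem.Set.contains_iff]
  unfold pvEndingsSet
  rw [PySem.Set.mem_ofList, List.mem_map]
  constructor
  · rintro ⟨e, he, hcond⟩
    refine ⟨e, he, ?_⟩
    rw [Bool.or_eq_true] at hcond
    have : pvLastSeg k.toList = e.toList := by
      rw [pv_lastSeg_eq_iff _ _ (pv_endings_dashfree e he)]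
      rcases hcond with h | h
      · left
        have : k = e := by simpa using h
        rw [this]
      · right
        rw [PySem.Str.endswith_eq] at h
        rw [PySem.Chars.endswith_iff] at h
        simpa using h
    exact this.symm
  · rintro ⟨e, he, hseg⟩
    refine ⟨e, he, ?_⟩
    rw [Bool.or_eq_true]
    have := (pv_lastSeg_eq_iff k.toList e.toList (pv_endings_dashfree e he)).mp hseg.symm
    rcases this with h | h
    · left
      have : k = e := String.toList_injective h
      simpa using this
    · right
      rw [PySem.Str.endswith_eq, PySem.Chars.endswith_iff]
      simpa using h

-- ===== VERDICT (by name: the statement is the Claim_ definition above) =====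
theorem is_topic_plural_spec : Claim_equal_is_topic_plural := by
  intro t _
  unfold Spec_is_topic_plural is_topic_plural is_topic_plural_alt
  simp only []
  rw [pv_any_eq_contains (PySem.Str.lower t)]
  cases h : PySem.Set.contains pvEndingsSet (pvLastSeg (PySem.Str.lower t).toList) <;> simp
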